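-- pv_equiv track=rewrite | github.com/peosunak/185homework | mcb185.py | manhat
-- ===== SOURCE A (Python) =====
-- def manhat(totdict, inddict):
-- 	dis = 0
-- 	for k in totdict.keys():
-- 		if k not in inddict:
-- 			dis += totdict[k]
-- 		else:
-- 			dis += abs(totdict[k]-inddict[k])
-- 	return dis
-- ===== SOURCE B (Python) =====
-- def manhat(totdict, inddict):
--     dist = dict(totdict)
--     for k, v in inddict.items():
--         if k in dist:
--             dist[k] = abs(dist[k] - v)
--     return sum(dist.values())
-- ===== Notes on version B (the rewrite author's own statement) =====
-- stated objective: alternative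
-- what changed: Instead of A's read-only loop over totdict with a per-key branch and a running total, B copies totdict into a mutable dict, iterates over the OTHER dict (inddict) overwriting each shared key with the absolute difference, and finally sums the dict's values.
import Mathlib
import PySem

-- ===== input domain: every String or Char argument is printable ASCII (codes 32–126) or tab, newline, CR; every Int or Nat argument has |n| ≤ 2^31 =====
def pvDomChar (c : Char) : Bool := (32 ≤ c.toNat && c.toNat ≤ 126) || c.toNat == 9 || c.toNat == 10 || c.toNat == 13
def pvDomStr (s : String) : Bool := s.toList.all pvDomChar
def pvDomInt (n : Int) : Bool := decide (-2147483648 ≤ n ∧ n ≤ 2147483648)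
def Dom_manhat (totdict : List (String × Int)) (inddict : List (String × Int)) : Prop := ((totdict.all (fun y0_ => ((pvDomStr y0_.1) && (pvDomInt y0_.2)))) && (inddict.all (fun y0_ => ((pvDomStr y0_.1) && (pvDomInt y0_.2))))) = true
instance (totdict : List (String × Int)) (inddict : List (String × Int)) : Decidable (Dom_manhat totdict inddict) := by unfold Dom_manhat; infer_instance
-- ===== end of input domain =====

-- B copies totdict into a mutable dict, loops over inddict overwriting each shared key with the
-- absolute difference, and sums the dict's values — a different traversal and maintained structure
-- than A's read-only loop over totdict with a running total; same cost (objective: alternative).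

-- ===== PORT A =====
-- literal port of A: one fold over totdict's keys, branching per key, accumulating dis
def manhat (totdict : List (String × Int)) (inddict : List (String × Int)) : Int :=
  (PySem.Dict.mk totdict).keys.foldl (fun dis k =>
    if (PySem.Dict.mk inddict).contains k = false then
      dis + (PySem.Dict.mk totdict).getD k 0
    else
      dis + |(PySem.Dict.mk totdict).getD k 0 - (PySem.Dict.mk inddict).getD k 0|) 0

-- ===== PORT B =====
-- literal port of B: dist = dict(totdict); for k, v in inddict.items(): if k in dist:
-- dist[k] = abs(dist[k] - v); return sum(dist.values())
def manhat_alt (totdict : List (String × Int)) (inddict : List (String × Int)) : Int :=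
  let dist := inddict.foldl
    (fun d kv => if d.contains kv.1 then d.modify kv.1 0 (fun x => |x - kv.2|) else d)
    (PySem.Dict.mk totdict)
  dist.values.sum

-- ===== PRECONDITION & SPEC =====
-- Pre_ excludes association lists with duplicate keys: a Python dict cannot hold them, so such
-- lists are an ambiguous representation (Python keeps the last value, PySem lookup the first).
def Pre_manhat (totdict : List (String × Int)) (inddict : List (String × Int)) : Prop :=
  (totdict.map Prod.fst).Nodup ∧ (inddict.map Prod.fst).Nodup
instance (totdict : List (String × Int)) (inddict : List (String × Int)) : Decidable (Pre_manhat totdict inddict) := by unfold Pre_manhat; infer_instance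

def pvWitness_manhat : (List (String × Int)) × (List (String × Int)) :=
  ([("a", -3), ("b", 4)], [("b", 9), ("c", 1)])

def Spec_manhat (totdict : List (String × Int)) (inddict : List (String × Int)) (out : Int) : Prop := out = manhat_alt totdict inddict
instance (totdict : List (String × Int)) (inddict : List (String × Int)) (out : Int) : Decidable (Spec_manhat totdict inddict out) := by unfold Spec_manhat; infer_instance

-- ===== CLAIM (what is proved, stated in full; the proofs are below) =====
def Claim_equal_manhat : Prop := ∀ (totdict : List (String × Int)) (inddict : List (String × Int)), Dom_manhat totdict inddict → Pre_manhat totdict inddict → Spec_manhat totdict inddict (manhat totdict inddict)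

-- ===== LEMMAS AND PROOFS =====

-- B's update loop never changes the key list (it only modifies keys already present).
theorem manhat_loop_keys (ind : List (String × Int)) (d : PySem.Dict String Int) :
    (ind.foldl (fun d kv => if d.contains kv.1 then d.modify kv.1 0 (fun x => |x - kv.2|) else d) d).keys
      = d.keys := by
  induction ind generalizing d with
  | nil => rfl
  | cons kv rest ih =>
    simp only [List.foldl_cons]
    by_cases h : d.contains kv.1
    · rw [if_pos h, ih, PySem.Dict.keys_modify, PySem.Dict.keys_insert_of_contains _ _ h]
    · rw [if_neg h, ih]

-- pointwise value of B's dict after the loop, for inddict with unique keys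
theorem manhat_loop_getD (ind : List (String × Int)) (d : PySem.Dict String Int) (k : String)
    (hnd : (ind.map Prod.fst).Nodup) :
    (ind.foldl (fun d kv => if d.contains kv.1 then d.modify kv.1 0 (fun x => |x - kv.2|) else d) d).getD k 0
      = if d.contains k = true ∧ (PySem.Dict.mk ind).contains k = true
        then |d.getD k 0 - (PySem.Dict.mk ind).getD k 0|
        else d.getD k 0 := by
  induction ind generalizing d with
  | nil =>
    simp [PySem.Dict.contains_mk]
  | cons kv rest ih =>
    simp only [List.map_cons, List.nodup_cons] at hnd
    obtain ⟨ha, hrest⟩ := hnd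
    have hrestc : (PySem.Dict.mk rest).contains kv.1 = false := by
      simp only [PySem.Dict.contains_mk, List.any_eq_false, beq_iff_eq]
      intro p hp he
      exact ha (he ▸ List.mem_map_of_mem hp)
    simp only [List.foldl_cons]
    rw [ih _ hrest]
    by_cases hk : k = kv.1
    · subst hk
      rw [hrestc]
      have hcons : (PySem.Dict.mk (kv :: rest)).contains kv.1 = true := by
        simp [PySem.Dict.contains_mk]
      have hget : (PySem.Dict.mk (kv :: rest)).getD kv.1 0 = kv.2 := by
        rw [PySem.Dict.getD_eq_get?_getD, PySem.Dict.get?_mk_cons]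
        simp
      by_cases hc : d.contains kv.1 = true
      · simp [hc, hcons, PySem.Dict.getD_modify_self, hget]
      · simp [hc, hcons]
    · have hne : (k == kv.1) = false := by simp [hk]
      have hne' : kv.1 ≠ k := fun h => hk h.symm
      have hconsc : (PySem.Dict.mk (kv :: rest)).contains k = (PySem.Dict.mk rest).contains k := by
        simp only [PySem.Dict.contains_mk, List.any_cons]
        simp [hne']
      have hconsg : (PySem.Dict.mk (kv :: rest)).getD k 0 = (PySem.Dict.mk rest).getD k 0 := by
        rw [PySem.Dict.getD_eq_get?_getD, PySem.Dict.get?_mk_cons, PySem.Dict.getD_eq_get?_getD]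
        simp [hne']
      by_cases hc : d.contains kv.1 = true
      · simp only [if_pos hc]
        rw [PySem.Dict.getD_modify_of_ne _ _ _ hk, PySem.Dict.contains_modify, hne,
          Bool.false_or, hconsc, hconsg]
      · simp only [if_neg hc, hconsc, hconsg]

-- reduce A's accumulating fold to a sum over totdict's keys
theorem manhat_a_sum (totdict inddict : List (String × Int)) :
    manhat totdict inddict
      = ((PySem.Dict.mk totdict).keys.map (fun k =>
          if (PySem.Dict.mk inddict).contains k = false then (PySem.Dict.mk totdict).getD k 0
          else |(PySem.Dict.mk totdict).getD k 0 - (PySem.Dict.mk inddict).getD k 0|)).sum := by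
  unfold manhat
  have : (fun (dis : Int) (k : String) =>
      if (PySem.Dict.mk inddict).contains k = false then dis + (PySem.Dict.mk totdict).getD k 0
      else dis + |(PySem.Dict.mk totdict).getD k 0 - (PySem.Dict.mk inddict).getD k 0|)
    = (fun dis k => dis + (if (PySem.Dict.mk inddict).contains k = false
        then (PySem.Dict.mk totdict).getD k 0
        else |(PySem.Dict.mk totdict).getD k 0 - (PySem.Dict.mk inddict).getD k 0|)) := by
    funext dis k; split <;> rfl
  rw [this, PySem.List.foldl_add, zero_add]

theorem manhat_eq (totdict inddict : List (String × Int))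
    (ht : (totdict.map Prod.fst).Nodup) (hi : (inddict.map Prod.fst).Nodup) :
    manhat totdict inddict = manhat_alt totdict inddict := by
  have hkeys := manhat_loop_keys inddict (PySem.Dict.mk totdict)
  have hnodup : ((inddict.foldl (fun d kv => if d.contains kv.1 then d.modify kv.1 0 (fun x => |x - kv.2|) else d) (PySem.Dict.mk totdict))).keys.Nodup := by
    rw [hkeys, PySem.Dict.keys_mk]; exact ht
  show manhat totdict inddict
      = ((inddict.foldl (fun d kv => if d.contains kv.1 then d.modify kv.1 0 (fun x => |x - kv.2|) else d) (PySem.Dict.mk totdict))).values.sum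
  rw [PySem.Dict.values_eq_map_keys _ hnodup 0, hkeys, manhat_a_sum]
  apply congrArg
  apply List.map_congr_left
  intro k hkmem
  have hck : (PySem.Dict.mk totdict).contains k = true := by
    rw [PySem.Dict.contains_eq_decide_mem_keys]
    simpa using hkmem
  rw [manhat_loop_getD _ _ _ hi]
  by_cases hc : (PySem.Dict.mk inddict).contains k = true
  · simp [hck, hc]
  · simp [hck, hc]

-- ===== VERDICT (by name: the statement is the Claim_ definition above) =====
theorem manhat_spec : Claim_equal_manhat := by
  intro totdict inddict _ hpre
  unfold Spec_manhat
  exact manhat_eq totdict inddict hpre.1 hpre.2
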